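-- pv_equiv track=rewrite | github.com/dominicdesy/intelia-expert | rag/knowledge_extractor/weaviate_integration/validator.py | _normalize_genetic_line_for_comparison
-- ===== SOURCE A (Python) =====
-- def _normalize_genetic_line_for_comparison(genetic_line: str) -> str:
--     """Normalise une lignée génétique pour comparaison"""
--     if not genetic_line:
--         return "unknown"
--
--     normalized = genetic_line.lower().strip()
--
--     # Mappings de normalisation pour comparaison
--     normalizations = {
--         "hy-line brown": ["hyline brown", "hy_line_brown", "hylinebrown", "hb"],
--         "ross 308": ["ross308", "ross_308", "ross-308"],
--         "cobb 500": ["cobb500", "cobb_500", "cobb-500"],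
--         "hubbard classic": ["hubbardclassic", "hubbard_classic", "classic"],
--         "isa brown": ["isabrown", "isa_brown"],
--         "lohmann brown": ["lohmannbrown", "lohmann_brown", "lb"],
--     }
--
--     for canonical, variants in normalizations.items():
--         if normalized == canonical or normalized in variants:
--             return canonical
--
--     return normalized
-- ===== SOURCE B (Python) =====
-- _NORMALIZATIONS = {
--     "hy-line brown": ["hyline brown", "hy_line_brown", "hylinebrown", "hb"],
--     "ross 308": ["ross308", "ross_308", "ross-308"],
--     "cobb 500": ["cobb500", "cobb_500", "cobb-500"],
--     "hubbard classic": ["hubbardclassic", "hubbard_classic", "classic"],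
--     "isa brown": ["isabrown", "isa_brown"],
--     "lohmann brown": ["lohmannbrown", "lohmann_brown", "lb"],
-- }
--
-- # Flat (key, canonical) pairs — each canonical keyed by itself and by each variant —
-- # sorted once so lookups can use divide-and-conquer binary search instead of a scan.
-- _PAIRS = sorted(
--     [(k, c) for c, vs in _NORMALIZATIONS.items() for k in [c] + vs],
--     key=lambda p: p[0],
-- )
--
--
-- def _bsearch(key, pairs):
--     """Recursive binary search on sorted (key, canonical) pairs; None if absent."""
--     if not pairs:
--         return None
--     m = len(pairs) // 2
--     k, c = pairs[m]
--     if key == k: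
--         return c
--     if key < k:
--         return _bsearch(key, pairs[:m])
--     return _bsearch(key, pairs[m + 1:])
--
--
-- def _normalize_genetic_line_for_comparison(genetic_line: str) -> str:
--     """Normalise une lignée génétique pour comparaison"""
--     if not genetic_line:
--         return "unknown"
--     normalized = genetic_line.lower().strip()
--     hit = _bsearch(normalized, _PAIRS)
--     return hit if hit is not None else normalized
-- ===== Notes on version B (the rewrite author's own statement) =====
-- stated objective: alternative
-- what changed: A's linear scan over the canonical/variant table (equality plus list-membership per entry) is replaced by a flat (key, canonical) array built and sorted once at module load and queried by a recursive binary search on slices; the per-call loop over alias lists disappears.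
import Mathlib
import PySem

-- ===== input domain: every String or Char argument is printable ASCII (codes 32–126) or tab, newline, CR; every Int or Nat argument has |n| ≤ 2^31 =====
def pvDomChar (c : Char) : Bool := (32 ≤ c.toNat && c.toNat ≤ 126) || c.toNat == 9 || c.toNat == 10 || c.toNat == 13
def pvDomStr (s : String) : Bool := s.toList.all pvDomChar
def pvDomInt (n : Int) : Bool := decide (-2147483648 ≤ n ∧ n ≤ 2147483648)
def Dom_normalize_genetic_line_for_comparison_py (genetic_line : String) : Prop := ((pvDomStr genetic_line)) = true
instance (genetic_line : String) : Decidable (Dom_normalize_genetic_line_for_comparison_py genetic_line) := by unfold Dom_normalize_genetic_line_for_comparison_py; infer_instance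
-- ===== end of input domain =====

-- B replaces A's linear scan over per-canonical variant lists by recursive binary search
-- on one flat (key, canonical) array sorted once at module load (objective: alternative).

-- ===== PORT A =====
-- the `normalizations` dict literal of A, as an association list in insertion order
def pvNormalizations : List (String × List String) :=
  [("hy-line brown", ["hyline brown", "hy_line_brown", "hylinebrown", "hb"]),
   ("ross 308", ["ross308", "ross_308", "ross-308"]),
   ("cobb 500", ["cobb500", "cobb_500", "cobb-500"]),
   ("hubbard classic", ["hubbardclassic", "hubbard_classic", "classic"]),
   ("isa brown", ["isabrown", "isa_brown"]),
   ("lohmann brown", ["lohmannbrown", "lohmann_brown", "lb"])]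

-- A's `for canonical, variants in normalizations.items(): if … : return canonical`
def pvMatchLoop (normalized : String) : List (String × List String) → String
  | [] => normalized
  | (canonical, variants) :: rest =>
      if normalized = canonical ∨ normalized ∈ variants then canonical
      else pvMatchLoop normalized rest

def normalize_genetic_line_for_comparison_py (genetic_line : String) : String :=
  if genetic_line = "" then "unknown"
  else pvMatchLoop (PySem.Str.strip (PySem.Str.lower genetic_line)) pvNormalizations

-- ===== PORT B =====
-- Source B's `_PAIRS`: the flat comprehension over _NORMALIZATIONS, sorted by the key
-- (Python's `<` on str = Lean's `<` on .toList, per PySem; compared on toList throughout)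
def pvPairs : List (String × String) :=
  PySem.List.sorted
    (pvNormalizations.flatMap (fun cv => (cv.1 :: cv.2).map (fun k => (k, cv.1))))
    (fun p => p.1.toList) false

-- Source B's `_bsearch`: recursive binary search on slices of the sorted pair list
-- (fuel = a totality device only; fuel ≥ pairs.length never runs out since each call shrinks pairs)
def pvBSearch (fuel : Nat) (key : List Char) (pairs : List (String × String)) : Option String :=
  match fuel with
  | 0 => none
  | fuel + 1 =>
    if pairs = [] then none
    else
      let m := pairs.length / 2
      let p := pairs.getD m ("", "")
      if key = p.1.toList then some p.2
      else if key < p.1.toList then pvBSearch fuel key (pairs.take m)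
      else pvBSearch fuel key (pairs.drop (m + 1))

def normalize_genetic_line_for_comparison_py_alt (genetic_line : String) : String :=
  if genetic_line = "" then "unknown"
  else
    let normalized := PySem.Str.strip (PySem.Str.lower genetic_line)
    -- `hit if hit is not None else normalized`
    (pvBSearch pvPairs.length normalized.toList pvPairs).getD normalized

-- ===== PRECONDITION & SPEC =====
def Spec_normalize_genetic_line_for_comparison_py (genetic_line : String) (out : String) : Prop := out = normalize_genetic_line_for_comparison_py_alt genetic_line
instance (genetic_line : String) (out : String) : Decidable (Spec_normalize_genetic_line_for_comparison_py genetic_line out) := by unfold Spec_normalize_genetic_line_for_comparison_py; infer_instance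

-- ===== CLAIM =====
def Claim_equal_normalize_genetic_line_for_comparison_py : Prop := ∀ (genetic_line : String), Dom_normalize_genetic_line_for_comparison_py genetic_line → Spec_normalize_genetic_line_for_comparison_py genetic_line (normalize_genetic_line_for_comparison_py genetic_line)

-- ===== LEMMAS AND PROOFS =====

-- binary search misses every list none of whose keys equals the query (no sortedness needed)
lemma pvBSearch_none (fuel : Nat) (key : List Char) :
    ∀ pairs : List (String × String), (∀ p ∈ pairs, key ≠ p.1.toList) →
      pvBSearch fuel key pairs = none := by
  induction fuel with
  | zero => intro pairs _; rfl
  | succ fuel ih =>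
      intro pairs h
      unfold pvBSearch
      by_cases hne : pairs = []
      · simp [hne]
      · have hm : pairs.length / 2 < pairs.length := by
          have : pairs.length ≠ 0 := fun h0 => hne (List.eq_nil_of_length_eq_zero h0)
          omega
        have hget : pairs.getD (pairs.length / 2) ("", "") = pairs[pairs.length / 2] :=
          List.getD_eq_getElem pairs _ hm
        have hne' : key ≠ (pairs.getD (pairs.length / 2) ("", "")).1.toList := by
          rw [hget]; exact h _ (List.getElem_mem hm)
        simp only [hne, if_false, hne']
        split
        · exact ih _ (fun q hq => h q (List.mem_of_mem_take hq))
        · exact ih _ (fun q hq => h q (List.mem_of_mem_drop hq))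

-- the per-call core: A's scan and B's binary search agree on EVERY normalized string
lemma loop_eq_bsearch (n : String) :
    pvMatchLoop n pvNormalizations =
      (pvBSearch pvPairs.length n.toList pvPairs).getD n := by
  by_cases h1 : n = "hy-line brown"; · subst h1; decide
  by_cases h2 : n = "hyline brown"; · subst h2; decide
  by_cases h3 : n = "hy_line_brown"; · subst h3; decide
  by_cases h4 : n = "hylinebrown"; · subst h4; decide
  by_cases h5 : n = "hb"; · subst h5; decide
  by_cases h6 : n = "ross 308"; · subst h6; decide
  by_cases h7 : n = "ross308"; · subst h7; decide
  by_cases h8 : n = "ross_308"; · subst h8; decide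
  by_cases h9 : n = "ross-308"; · subst h9; decide
  by_cases h10 : n = "cobb 500"; · subst h10; decide
  by_cases h11 : n = "cobb500"; · subst h11; decide
  by_cases h12 : n = "cobb_500"; · subst h12; decide
  by_cases h13 : n = "cobb-500"; · subst h13; decide
  by_cases h14 : n = "hubbard classic"; · subst h14; decide
  by_cases h15 : n = "hubbardclassic"; · subst h15; decide
  by_cases h16 : n = "hubbard_classic"; · subst h16; decide
  by_cases h17 : n = "classic"; · subst h17; decide
  by_cases h18 : n = "isa brown"; · subst h18; decide
  by_cases h19 : n = "isabrown"; · subst h19; decide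
  by_cases h20 : n = "isa_brown"; · subst h20; decide
  by_cases h21 : n = "lohmann brown"; · subst h21; decide
  by_cases h22 : n = "lohmannbrown"; · subst h22; decide
  by_cases h23 : n = "lohmann_brown"; · subst h23; decide
  by_cases h24 : n = "lb"; · subst h24; decide
  have hpairs : pvPairs = [("classic", "hubbard classic"), ("cobb 500", "cobb 500"),
      ("cobb-500", "cobb 500"), ("cobb500", "cobb 500"), ("cobb_500", "cobb 500"),
      ("hb", "hy-line brown"), ("hubbard classic", "hubbard classic"),
      ("hubbard_classic", "hubbard classic"), ("hubbardclassic", "hubbard classic"),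
      ("hy-line brown", "hy-line brown"), ("hy_line_brown", "hy-line brown"),
      ("hyline brown", "hy-line brown"), ("hylinebrown", "hy-line brown"),
      ("isa brown", "isa brown"), ("isa_brown", "isa brown"), ("isabrown", "isa brown"),
      ("lb", "lohmann brown"), ("lohmann brown", "lohmann brown"),
      ("lohmann_brown", "lohmann brown"), ("lohmannbrown", "lohmann brown"),
      ("ross 308", "ross 308"), ("ross-308", "ross 308"), ("ross308", "ross 308"),
      ("ross_308", "ross 308")] := by decide
  have hnone : pvBSearch pvPairs.length n.toList pvPairs = none := by
    apply pvBSearch_none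
    intro p hp
    rw [hpairs] at hp
    intro hEq
    have hn : n = p.1 := String.toList_inj.mp hEq
    fin_cases hp <;> simp_all
  rw [hnone, Option.getD_none]
  simp [pvMatchLoop, pvNormalizations,
        h1, h2, h3, h4, h5, h6, h7, h8, h9, h10, h11, h12, h13, h14, h15, h16,
        h17, h18, h19, h20, h21, h22, h23, h24]

-- ===== VERDICT =====
theorem normalize_genetic_line_for_comparison_py_spec : Claim_equal_normalize_genetic_line_for_comparison_py := by
  intro g _
  unfold Spec_normalize_genetic_line_for_comparison_py
  unfold normalize_genetic_line_for_comparison_py normalize_genetic_line_for_comparison_py_alt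
  by_cases hg : g = ""
  · subst hg; rfl
  · simp only [hg, if_false]
    exact loop_eq_bsearch _
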